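-- pv_equiv track=rewrite | github.com/Aerochrome/AdventOfCode2021 | day3/puzzle1.py | most_common_to_binary
-- ===== SOURCE A (Python) =====
-- def most_common_to_binary(common):
--     binary = ""
--     binary_inverse = ""
--     for num in common:
--         if num > 0:
--             binary += "1"
--             binary_inverse += "0"
--         else:
--             binary += "0"
--             binary_inverse += "1"
--
--     return [binary, binary_inverse]
-- ===== SOURCE B (Python) =====
-- def most_common_to_binary(common):
--     # Divide and conquer: pack the >0 tests of a range into one integer;
--     # the inverse is the arithmetic complement (1 << n) - 1 - v; both are
--     # rendered with format(..., 'b').zfill(n).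
--     n = len(common)
--     if n == 0:
--         return ["", ""]
--     v = _pack(common, 0, n)
--     inverse = (1 << n) - 1 - v
--     return [format(v, "b").zfill(n), format(inverse, "b").zfill(n)]
--
--
-- def _pack(common, lo, hi):
--     if hi - lo == 1:
--         return 1 if common[lo] > 0 else 0
--     mid = (lo + hi) // 2
--     return (_pack(common, lo, mid) << (hi - mid)) + _pack(common, mid, hi)
-- ===== Notes on version B (the rewrite author's own statement) =====
-- stated objective: alternative
-- what changed: B never builds the inverse string during the scan: a divide-and-conquer _pack packs the >0 tests of each half-range into one integer, the inverse comes from the arithmetic complement (1<<n)-1-v, and both integers are rendered with format(...,'b').zfill(n).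
import Mathlib
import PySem

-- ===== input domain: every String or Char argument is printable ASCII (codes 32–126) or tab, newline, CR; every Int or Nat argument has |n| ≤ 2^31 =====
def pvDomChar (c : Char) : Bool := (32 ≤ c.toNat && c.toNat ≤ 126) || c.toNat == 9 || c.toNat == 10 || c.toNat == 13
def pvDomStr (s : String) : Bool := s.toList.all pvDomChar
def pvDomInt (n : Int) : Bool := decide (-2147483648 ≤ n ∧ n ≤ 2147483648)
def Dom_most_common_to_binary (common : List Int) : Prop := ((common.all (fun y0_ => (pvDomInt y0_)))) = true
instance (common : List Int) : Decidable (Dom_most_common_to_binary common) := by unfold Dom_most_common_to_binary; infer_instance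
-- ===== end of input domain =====

-- B packs the >0 tests of each half-range into one integer by divide and conquer,
-- derives the inverse by the arithmetic complement (1<<n)-1-v, and renders both with
-- format(..,'b').zfill(n) instead of maintaining two strings in a loop (objective: alternative).

-- ===== PORT A =====
-- single loop accumulating both strings, as in A
def most_common_to_binary (common : List Int) : List String :=
  let p := common.foldl
    (fun (st : String × String) num =>
      if num > 0 then (st.1 ++ "1", st.2 ++ "0") else (st.1 ++ "0", st.2 ++ "1"))
    ("", "")
  [p.1, p.2]

-- ===== PORT B =====
-- pyBits v: the binary digits of v, most significant first ([] for 0)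
def pyBits (v : Nat) : List Char :=
  if v = 0 then [] else pyBits (v / 2) ++ [if v % 2 = 1 then '1' else '0']
decreasing_by exact Nat.div_lt_self (Nat.pos_of_ne_zero (by assumption)) (by norm_num)

-- format(v, "b") for a nonnegative int (all ints formatted in B are nonnegative)
def pyBinStr (v : Nat) : String :=
  if v = 0 then "0" else String.ofList (pyBits v)

-- s.zfill(n) for a sign-free digit string (exact here: B only zfills '0'/'1' strings)
def pyZfill (s : String) (n : Nat) : String :=
  String.ofList (List.replicate (n - s.toList.length) '0' ++ s.toList)

-- _pack(common, lo, hi): the >0 bits of common[lo:hi] packed into one integer,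
-- by divide and conquer exactly as in Source B. The 'hi - lo ≤ 1' guard only makes the
-- empty range (which Source B never reaches) total; common[lo] is PySem.List.pyGet?
-- (exact; the none branch is unreachable for 0 ≤ lo < len).
def pyPack (common : List Int) (lo hi : Nat) : Nat :=
  if hi - lo ≤ 1 then
    (match PySem.List.pyGet? common (lo : Int) with
     | some x => if x > 0 then 1 else 0
     | none => 0)
  else
    -- (lo + hi) // 2 on nonnegative ints: Nat division is exact here
    (pyPack common lo ((lo + hi) / 2)) <<< (hi - (lo + hi) / 2) + pyPack common ((lo + hi) / 2) hi
termination_by hi - lo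
decreasing_by all_goals omega

-- Python's ints here are all nonnegative ((1<<n)-1-v ≥ 0 since v < 2^n), so Nat
-- models them exactly; 1 << n is 2 ^ n.
def most_common_to_binary_alt (common : List Int) : List String :=
  let n := common.length
  if n = 0 then ["", ""]
  else
    let v := pyPack common 0 n
    let inverse := 2 ^ n - 1 - v
    [pyZfill (pyBinStr v) n, pyZfill (pyBinStr inverse) n]

-- ===== PRECONDITION & SPEC =====
def Spec_most_common_to_binary (common : List Int) (out : List String) : Prop := out = most_common_to_binary_alt common
instance (common : List Int) (out : List String) : Decidable (Spec_most_common_to_binary common out) := by unfold Spec_most_common_to_binary; infer_instance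

-- ===== CLAIM (what is proved, stated in full; the proofs are below) =====
def Claim_equal_most_common_to_binary : Prop := ∀ (common : List Int), Dom_most_common_to_binary common → Spec_most_common_to_binary common (most_common_to_binary common)

-- ===== LEMMAS AND PROOFS =====

-- padL n l: l left-padded with '0' to length n
def padL (n : Nat) (l : List Char) : List Char :=
  List.replicate (n - l.length) '0' ++ l

theorem pvLit1 : ("1" : String) = String.ofList ['1'] := by decide
theorem pvLit0 : ("0" : String) = String.ofList ['0'] := by decide

theorem pvOfList_append (l m : List Char) :
    String.ofList l ++ String.ofList m = String.ofList (l ++ m) := by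
  simp

theorem pyBits_len : ∀ (k v : Nat), v < 2 ^ k → (pyBits v).length ≤ k := by
  intro k
  induction k with
  | zero => intro v hv; interval_cases v; simp [pyBits]
  | succ k ih =>
    intro v hv
    by_cases h0 : v = 0
    · simp [h0, pyBits]
    · rw [pyBits, if_neg h0]
      have : v / 2 < 2 ^ k := by
        have := ih (v / 2)
        omega
      simpa using Nat.succ_le_succ (ih _ this)

theorem pyBits_step (v b : Nat) (hb : b < 2) (h : ¬(v = 0 ∧ b = 0)) :
    pyBits (2 * v + b) = pyBits v ++ [if b = 1 then '1' else '0'] := by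
  have hne : 2 * v + b ≠ 0 := by omega
  rw [pyBits, if_neg hne]
  have hdiv : (2 * v + b) / 2 = v := by omega
  have hmod : (2 * v + b) % 2 = b := by omega
  rw [hdiv, hmod]

theorem padL_step (k v b : Nat) (hb : b < 2) (hv : v < 2 ^ k) :
    padL (k + 1) (pyBits (2 * v + b)) = padL k (pyBits v) ++ [if b = 1 then '1' else '0'] := by
  by_cases h0 : v = 0 ∧ b = 0
  · obtain ⟨h1, h2⟩ := h0
    subst h1; subst h2
    simp [pyBits, padL, List.replicate_succ' (n := k)]
  · rw [pyBits_step v b hb h0]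
    have hlen := pyBits_len k v hv
    simp only [padL, List.length_append, List.length_singleton]
    rw [show k + 1 - ((pyBits v).length + 1) = k - (pyBits v).length by omega]
    simp

-- A's loop, started from the padded renderings of v and its complement, ends at the
-- padded renderings of B's accumulator and its complement.
theorem mctb_main : ∀ (common : List Int) (k v : Nat), v < 2 ^ k →
    common.foldl
      (fun (st : String × String) num =>
        if num > 0 then (st.1 ++ "1", st.2 ++ "0") else (st.1 ++ "0", st.2 ++ "1"))
      (String.ofList (padL k (pyBits v)), String.ofList (padL k (pyBits (2 ^ k - 1 - v))))
    = (String.ofList (padL (k + common.length)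
          (pyBits (common.foldl (fun (v : Nat) num => v * 2 + (if num > 0 then 1 else 0)) v))),
       String.ofList (padL (k + common.length)
          (pyBits (2 ^ (k + common.length) - 1 -
            common.foldl (fun (v : Nat) num => v * 2 + (if num > 0 then 1 else 0)) v)))) := by
  intro common
  induction common with
  | nil => intro k v hv; simp
  | cons num t ih =>
    intro k v hv
    simp only [List.foldl_cons, List.length_cons]
    have hcompl : 2 ^ k - 1 - v < 2 ^ k := by have : 1 ≤ 2 ^ k := Nat.one_le_two_pow; omega
    by_cases hnum : num > 0
    · rw [if_pos hnum, if_pos hnum]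
      have e1 : String.ofList (padL k (pyBits v)) ++ "1"
          = String.ofList (padL (k + 1) (pyBits (2 * v + 1))) := by
        rw [padL_step k v 1 (by norm_num) hv, pvLit1, pvOfList_append]
        norm_num
      have e2 : String.ofList (padL k (pyBits (2 ^ k - 1 - v))) ++ "0"
          = String.ofList (padL (k + 1) (pyBits (2 * (2 ^ k - 1 - v) + 0))) := by
        rw [padL_step k _ 0 (by norm_num) hcompl, pvLit0, pvOfList_append]
        norm_num
      rw [e1, e2]
      have hv' : 2 * v + 1 < 2 ^ (k + 1) := by rw [pow_succ]; omega
      have harith : 2 * (2 ^ k - 1 - v) + 0 = 2 ^ (k + 1) - 1 - (2 * v + 1) := by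
        have : 1 ≤ 2 ^ k := Nat.one_le_two_pow
        rw [pow_succ]; omega
      rw [harith, ih (k + 1) (2 * v + 1) hv']
      have : v * 2 + 1 = 2 * v + 1 := by ring
      rw [this]
      have : k + 1 + t.length = k + (t.length + 1) := by omega
      rw [this]
    · rw [if_neg hnum, if_neg hnum]
      have e1 : String.ofList (padL k (pyBits v)) ++ "0"
          = String.ofList (padL (k + 1) (pyBits (2 * v + 0))) := by
        rw [padL_step k v 0 (by norm_num) hv, pvLit0, pvOfList_append]
        norm_num
      have e2 : String.ofList (padL k (pyBits (2 ^ k - 1 - v))) ++ "1"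
          = String.ofList (padL (k + 1) (pyBits (2 * (2 ^ k - 1 - v) + 1))) := by
        rw [padL_step k _ 1 (by norm_num) hcompl, pvLit1, pvOfList_append]
        norm_num
      rw [e1, e2]
      have hv' : 2 * v + 0 < 2 ^ (k + 1) := by rw [pow_succ]; omega
      have harith : 2 * (2 ^ k - 1 - v) + 1 = 2 ^ (k + 1) - 1 - (2 * v + 0) := by
        have : 1 ≤ 2 ^ k := Nat.one_le_two_pow
        rw [pow_succ]; omega
      rw [harith, ih (k + 1) (2 * v + 0) hv']
      have : v * 2 + 0 = 2 * v + 0 := by ring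
      rw [this]
      have : k + 1 + t.length = k + (t.length + 1) := by omega
      rw [this]

theorem zfill_bin (n v : Nat) (hn : 1 ≤ n) :
    pyZfill (pyBinStr v) n = String.ofList (padL n (pyBits v)) := by
  by_cases h0 : v = 0
  · subst h0
    simp [pyBinStr, pyZfill, pyBits, padL, String.ext_iff, pvLit0]
    rw [show ['0'] = List.replicate 1 '0' from rfl, ← List.replicate_add]
    congr 1
    omega
  · simp [pyBinStr, if_neg h0, pyZfill, padL]

theorem bfold_split (l : List Int) : ∀ (v : Nat),
    l.foldl (fun (v : Nat) num => v * 2 + (if num > 0 then 1 else 0)) v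
    = v * 2 ^ l.length + l.foldl (fun (v : Nat) num => v * 2 + (if num > 0 then 1 else 0)) 0 := by
  induction l with
  | nil => intro v; simp
  | cons x t ih =>
    intro v
    simp only [List.foldl_cons, List.length_cons]
    rw [ih (v * 2 + if x > 0 then 1 else 0), ih (0 * 2 + if x > 0 then 1 else 0)]
    ring

theorem pack_eq (common : List Int) : ∀ (d lo hi : Nat), hi - lo = d → lo < hi →
    hi ≤ common.length →
    pyPack common lo hi
      = ((common.drop lo).take (hi - lo)).foldl
          (fun (v : Nat) num => v * 2 + (if num > 0 then 1 else 0)) 0 := by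
  intro d
  induction d using Nat.strong_induction_on with
  | _ d ih =>
    intro lo hi hd hlt hle
    by_cases hbase : hi - lo ≤ 1
    · have hhi : hi = lo + 1 := by omega
      have hlo : lo < common.length := by omega
      rw [pyPack, if_pos hbase]
      rw [PySem.List.pyGet?_natCast, List.getElem?_eq_getElem hlo]
      have hdrop : common.drop lo = common[lo] :: common.drop (lo + 1) :=
        List.drop_eq_getElem_cons hlo
      subst hhi
      rw [show lo + 1 - lo = 0 + 1 by omega, hdrop, List.take_succ_cons, List.take_zero,
          List.foldl_cons, List.foldl_nil]
      simp
    · rw [pyPack, if_neg hbase]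
      have hmid1 : lo < (lo + hi) / 2 := by omega
      have hmid2 : (lo + hi) / 2 < hi := by omega
      have e1 := ih ((lo + hi) / 2 - lo) (by omega) lo ((lo + hi) / 2) rfl hmid1 (by omega)
      have e2 := ih (hi - (lo + hi) / 2) (by omega) ((lo + hi) / 2) hi rfl hmid2 hle
      rw [e1, e2, Nat.shiftLeft_eq]
      have hsplit : (common.drop lo).take (hi - lo)
          = (common.drop lo).take ((lo + hi) / 2 - lo)
            ++ (common.drop ((lo + hi) / 2)).take (hi - (lo + hi) / 2) := by
        rw [show hi - lo = ((lo + hi) / 2 - lo) + (hi - (lo + hi) / 2) by omega,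
            List.take_add, List.drop_drop]
        congr 3
        omega
      have hlen : ((common.drop ((lo + hi) / 2)).take (hi - (lo + hi) / 2)).length
          = hi - (lo + hi) / 2 := by
        rw [List.length_take, List.length_drop]
        omega
      rw [hsplit, List.foldl_append]
      conv_rhs => rw [bfold_split]
      rw [hlen]

-- ===== VERDICT (by name: the statement is the Claim_ definition above) =====
theorem most_common_to_binary_spec : Claim_equal_most_common_to_binary := by
  intro common _
  show _ = _
  have h0 : ("" : String) = String.ofList (padL 0 (pyBits 0)) := by
    rw [show pyBits 0 = [] by simp [pyBits]]
    decide
  have base := mctb_main common 0 0 (by norm_num)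
  simp only [pow_zero, Nat.sub_self, Nat.zero_add] at base
  unfold most_common_to_binary most_common_to_binary_alt
  simp only []
  rw [h0, base]
  by_cases hn : common.length = 0
  · have : common = [] := List.eq_nil_of_length_eq_zero hn
    subst this
    simp only [List.length_nil, List.foldl_nil, pow_zero]
    rw [show (1:Nat) - 1 - 0 = 0 by rfl, show pyBits 0 = [] by simp [pyBits]]
    decide
  · rw [if_neg hn]
    have hn1 : 1 ≤ common.length := by omega
    rw [pack_eq common common.length 0 common.length rfl (by omega) (le_refl _)]
    simp only [List.drop_zero, Nat.sub_zero, List.take_length]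
    rw [zfill_bin _ _ hn1, zfill_bin _ _ hn1]
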